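-- pv_equiv track=rewrite | github.com/jroweboy/evolve-machine-game | tools/Darwin/tilificator/tilificator/common.py | makeNext1
-- ===== SOURCE A (Python) =====
-- def makeRisingEdge(buf):
--     rising = [0] * len(buf)
--     for i in range(len(buf)):
--         previous = 0 if i == 0 else buf[i - 1]
--         if buf[i] != 0 and previous == 0:
--             rising[i] = 1
--     return rising
--
-- def makeNext1(buf):
--     rising = makeRisingEdge(buf)
--     next1 = [len(buf)] * len(buf)
--     nextIndex = len(buf)
--     for i in range(len(buf) - 1, -1, -1):
--         if rising[i] != 0 or buf[i] != 0:
--             nextIndex = i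
--         next1[i] = nextIndex
--     # Now fix the last ones...
--     if len(buf) in next1:
--         firstNonFixed = next1.index(len(buf))
--         for i in range(firstNonFixed, len(buf)):
--             next1[i] = next1[i - 1]
--     return next1
-- ===== SOURCE B (Python) =====
-- def makeNext1(buf):
--     n = len(buf)
--     nz = [i for i, v in enumerate(buf) if v != 0]
--     if not nz:
--         return [n] * n
--     out = []
--     p = 0
--     for i in range(n):
--         while p < len(nz) and nz[p] < i:
--             p += 1
--         out.append(nz[p] if p < len(nz) else nz[-1])
--     return out
-- ===== Notes on version B (the rewrite author's own statement) =====
-- stated objective: simpler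
-- what changed: B collects the nonzero indices once and fills the result in a single forward two-pointer pass (last nonzero as trailing default), replacing A's rising-edge helper, backward scan and .index fix-up loop.
import Mathlib
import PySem

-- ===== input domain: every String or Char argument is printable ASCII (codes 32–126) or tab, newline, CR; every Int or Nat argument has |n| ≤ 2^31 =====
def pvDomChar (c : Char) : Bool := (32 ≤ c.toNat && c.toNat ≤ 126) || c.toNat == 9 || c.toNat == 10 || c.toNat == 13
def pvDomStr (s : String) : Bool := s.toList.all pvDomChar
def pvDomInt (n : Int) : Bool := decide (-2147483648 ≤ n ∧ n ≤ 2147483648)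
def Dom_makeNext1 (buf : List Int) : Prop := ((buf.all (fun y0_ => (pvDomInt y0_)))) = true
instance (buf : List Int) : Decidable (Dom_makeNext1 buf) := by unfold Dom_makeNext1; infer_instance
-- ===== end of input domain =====

-- B replaces A's rising-edge helper, backward scan and .index fix-up by one forward
-- two-pointer pass over the list of nonzero indices (objective: simpler).

-- ===== PORT A =====
def makeRisingEdge (buf : List Int) : List Int :=
  (PySem.List.pyRange 0 (buf.length : Int) 1).foldl
    (fun rising i =>
      let previous : Int := if i = 0 then 0 else PySem.List.pyGetD buf (i - 1) 0
      if PySem.List.pyGetD buf i 0 ≠ 0 ∧ previous = 0 then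
        PySem.List.pySetD rising i 1
      else rising)
    (List.replicate buf.length (0 : Int))

-- loop body of A's backward pass (the next1[i] assignment is always in range in Python)
def stepA (rising buf : List Int) (st : List Int × Int) (i : Int) : List Int × Int :=
  let nextIndex :=
    if PySem.List.pyGetD rising i 0 ≠ 0 ∨ PySem.List.pyGetD buf i 0 ≠ 0 then i else st.2
  (PySem.List.pySetD st.1 i nextIndex, nextIndex)

-- loop body of A's fix-up loop; next1[i-1] is always in range in Python (i-1 = -1 wraps to the end)
def stepFix (arr : List Int) (i : Int) : List Int :=
  PySem.List.pySetD arr i (PySem.List.pyGetD arr (i - 1) 0)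

def makeNext1 (buf : List Int) : List Int :=
  let n := buf.length
  let rising := makeRisingEdge buf
  let st :=
    (PySem.List.pyRange ((n : Int) - 1) (-1) (-1)).foldl (stepA rising buf)
      (List.replicate n ((n : Int)), (n : Int))
  let next1 := st.1
  if (n : Int) ∈ next1 then
    let firstNonFixed := (PySem.List.index? next1 ((n : Int))).getD 0
    (PySem.List.pyRange ((firstNonFixed : Int)) ((n : Int)) 1).foldl stepFix next1
  else next1

-- ===== PORT B =====
-- the inner 'while p < len(nz) and nz[p] < i: p += 1'
def bAdvance (nz : List Int) (i : Int) (p : Nat) : Nat :=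
  if h : p < nz.length then
    if nz[p] < i then bAdvance nz i (p + 1) else p
  else p
termination_by nz.length - p

-- loop body of B's single forward pass
def stepB (nz : List Int) (st : Nat × List Int) (i : Nat) : Nat × List Int :=
  let p := bAdvance nz (i : Int) st.1
  (p, st.2 ++ [if h : p < nz.length then nz[p] else nz.getLastD 0])

def makeNext1_alt (buf : List Int) : List Int :=
  let n := buf.length
  let nz := (PySem.List.enumerate buf 0).filterMap
      (fun iv => if iv.2 ≠ 0 then some iv.1 else none)
  if nz = [] then List.replicate n ((n : Int))
  else ((List.range n).foldl (stepB nz) (0, [])).2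

-- ===== PRECONDITION & SPEC =====
def Spec_makeNext1 (buf : List Int) (out : List Int) : Prop := out = makeNext1_alt buf
instance (buf : List Int) (out : List Int) : Decidable (Spec_makeNext1 buf out) := by unfold Spec_makeNext1; infer_instance

-- ===== CLAIM (what is proved, stated in full; the proofs are below) =====
def Claim_equal_makeNext1 : Prop := ∀ (buf : List Int), Dom_makeNext1 buf → Spec_makeNext1 buf (makeNext1 buf)

-- ===== LEMMAS AND PROOFS =====

-- first index ≥ k holding a nonzero entry, or buf.length if there is none
def g0 (buf : List Int) (k : Nat) : Nat :=
  if h : k < buf.length then (if buf.getD k 0 ≠ 0 then k else g0 buf (k + 1)) else buf.length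
termination_by buf.length - k

def nzK (buf : List Int) : List Nat :=
  (List.range buf.length).filter (fun j => buf.getD j 0 != 0)

def nzL (buf : List Int) : List Int := (nzK buf).map (fun (j : Nat) => (j : Int))

def cnt (buf : List Int) (i : Nat) : Nat := (nzK buf).countP (fun j => decide (j < i))

def hB (buf : List Int) (m : Nat) : Int :=
  if h : cnt buf m < (nzL buf).length then (nzL buf)[cnt buf m] else (nzL buf).getLastD 0

theorem g0_of_lt {buf : List Int} {k : Nat} (h : k < buf.length) :
    g0 buf k = if buf.getD k 0 ≠ 0 then k else g0 buf (k + 1) := by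
  rw [g0]; simp [h]

theorem g0_of_ge {buf : List Int} {k : Nat} (h : buf.length ≤ k) : g0 buf k = buf.length := by
  rw [g0]; simp [Nat.not_lt.mpr h]

theorem g0_spec (buf : List Int) (k : Nat) :
    g0 buf k = buf.length ∨
      (k ≤ g0 buf k ∧ g0 buf k < buf.length ∧ buf.getD (g0 buf k) 0 ≠ 0 ∧
        ∀ j, k ≤ j → j < g0 buf k → buf.getD j 0 = 0) := by
  by_cases h : k < buf.length
  · rw [g0_of_lt h]
    by_cases hp : buf.getD k 0 ≠ 0
    · rw [if_pos hp]
      exact Or.inr ⟨le_refl k, h, hp, fun j hj hj2 => absurd hj2 (Nat.not_lt.mpr hj)⟩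
    · rw [if_neg hp]
      rcases g0_spec buf (k + 1) with h1 | ⟨h1, h2, h3, h4⟩
      · exact Or.inl h1
      · refine Or.inr ⟨by omega, h2, h3, fun j hj hj2 => ?_⟩
        by_cases hjk : j = k
        · subst hjk
          exact not_not.mp hp
        · exact h4 j (by omega) hj2
  · exact Or.inl (g0_of_ge (Nat.not_lt.mp h))
termination_by buf.length - k
decreasing_by omega

theorem g0_eq_iff (buf : List Int) (k : Nat) :
    g0 buf k = buf.length ↔ ∀ j, k ≤ j → j < buf.length → buf.getD j 0 = 0 := by
  by_cases h : k < buf.length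
  · rw [g0_of_lt h]
    by_cases hp : buf.getD k 0 ≠ 0
    · rw [if_pos hp]
      constructor
      · intro hk; omega
      · intro hall; exact absurd (hall k (le_refl k) h) hp
    · rw [if_neg hp]
      rw [g0_eq_iff buf (k + 1)]
      constructor
      · intro h1 j hj hjl
        by_cases hjk : j = k
        · subst hjk
          exact not_not.mp hp
        · exact h1 j (by omega) hjl
      · intro h1 j hj hjl; exact h1 j (by omega) hjl
  · constructor
    · intro _ j hj hjl; omega
    · intro _; exact g0_of_ge (Nat.not_lt.mp h)
termination_by buf.length - k
decreasing_by omega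

theorem g0_mono_eq {buf : List Int} {k j : Nat} (h : g0 buf k = buf.length) (hkj : k ≤ j) :
    g0 buf j = buf.length := by
  rw [g0_eq_iff] at h ⊢
  exact fun m hm hml => h m (le_trans hkj hm) hml

theorem foldl_inv {α σ : Type} (step : σ → α → σ) (Inv : σ → Prop) :
    ∀ (l : List α) (s : σ), Inv s → (∀ s a, a ∈ l → Inv s → Inv (step s a)) →
      Inv (l.foldl step s) := by
  intro l
  induction l with
  | nil => intro s hs _; exact hs
  | cons a t ih =>
    intro s hs hstep
    exact ih (step s a) (hstep s a (by simp) hs) (fun s b hb => hstep s b (by simp [hb]))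

theorem rising_sound (buf : List Int) :
    ∀ j : Nat, (makeRisingEdge buf).getD j 0 ≠ 0 → buf.getD j 0 ≠ 0 := by
  unfold makeRisingEdge
  refine foldl_inv _ (fun (arr : List Int) => ∀ j : Nat, arr.getD j 0 ≠ 0 → buf.getD j 0 ≠ 0) _ _ ?_ ?_
  · intro j hj
    exfalso; apply hj
    rw [List.getD_eq_getElem?_getD, List.getElem?_replicate]
    split <;> rfl
  · intro arr i hi hInv
    rw [PySem.List.mem_pyRange_one] at hi
    show (fun arr' => ∀ j : Nat, arr'.getD j 0 ≠ 0 → buf.getD j 0 ≠ 0)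
      (if PySem.List.pyGetD buf i 0 ≠ 0 ∧
          (if i = 0 then (0 : Int) else PySem.List.pyGetD buf (i - 1) 0) = 0
        then PySem.List.pySetD arr i 1 else arr)
    intro j hj
    by_cases hc : PySem.List.pyGetD buf i 0 ≠ 0 ∧
        (if i = 0 then (0 : Int) else PySem.List.pyGetD buf (i - 1) 0) = 0
    · rw [if_pos hc] at hj
      by_cases hji : j = i.toNat
      · subst hji
        have hbuf : PySem.List.pyGetD buf i 0 ≠ 0 := hc.1
        rwa [PySem.List.pyGetD_of_nonneg buf 0 hi.1] at hbuf
      · apply hInv j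
        rw [PySem.List.pySetD_of_nonneg arr 1 hi.1] at hj
        rwa [List.getD_eq_getElem?_getD, List.getElem?_set, if_neg (by omega),
          ← List.getD_eq_getElem?_getD] at hj
    · rw [if_neg hc] at hj
      exact hInv j hj

theorem cond_iff (buf : List Int) (k : Nat) :
    ((makeRisingEdge buf).getD k 0 ≠ 0 ∨ buf.getD k 0 ≠ 0) ↔ buf.getD k 0 ≠ 0 := by
  constructor
  · rintro (h | h)
    · exact rising_sound buf k h
    · exact h
  · exact Or.inr

-- A's backward pass produces g0 at every position
theorem foldA (buf : List Int) :
    ∀ k, k ≤ buf.length → ∀ ni : Int, ni = ((g0 buf k : Nat) : Int) →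
      (((List.range k).reverse.map (fun (j : Nat) => (j : Int))).foldl
          (stepA (makeRisingEdge buf) buf)
          ((List.range buf.length).map
              (fun j => if j < k then (buf.length : Int) else ((g0 buf j : Nat) : Int)),
            ni)).1
      = (List.range buf.length).map (fun j => ((g0 buf j : Nat) : Int)) := by
  intro k
  induction k with
  | zero =>
    intro _ ni _
    simp
  | succ k ih =>
    intro hk ni hni
    subst hni
    rw [List.range_succ, List.reverse_append, List.map_append]
    simp only [List.reverse_cons, List.reverse_nil, List.nil_append, List.map_cons,
      List.map_nil, List.singleton_append, List.foldl_cons]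
    have hkn : k < buf.length := hk
    have hstep :
        stepA (makeRisingEdge buf) buf
          ((List.range buf.length).map
              (fun j => if j < k + 1 then (buf.length : Int) else ((g0 buf j : Nat) : Int)),
            ((g0 buf (k + 1) : Nat) : Int)) ((k : Nat) : Int)
        = ((List.range buf.length).map
              (fun j => if j < k then (buf.length : Int) else ((g0 buf j : Nat) : Int)),
            ((g0 buf k : Nat) : Int)) := by
      unfold stepA
      rw [PySem.List.pyGetD_natCast, PySem.List.pyGetD_natCast]
      have hni : (if (makeRisingEdge buf).getD k 0 ≠ 0 ∨ buf.getD k 0 ≠ 0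
            then ((k : Nat) : Int)
            else ((g0 buf (k + 1) : Nat) : Int)) = ((g0 buf k : Nat) : Int) := by
        by_cases hp : buf.getD k 0 ≠ 0
        · rw [if_pos ((cond_iff buf k).mpr hp), g0_of_lt hkn, if_pos hp]
        · rw [if_neg (fun hor => hp ((cond_iff buf k).mp hor)), g0_of_lt hkn, if_neg hp]
      rw [hni]
      simp only [Prod.mk.injEq, and_true]
      rw [PySem.List.pySetD_natCast]
      apply List.ext_getElem (by simp)
      intro m h1 h2
      simp only [List.getElem_set, List.getElem_map, List.getElem_range,
        List.length_set, List.length_map, List.length_range] at h1 h2 ⊢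
      by_cases hm : k = m
      · subst hm; rw [if_pos rfl, if_neg (by omega)]
      · rw [if_neg hm]
        by_cases hlt : m < k
        · rw [if_pos (by omega), if_pos (by omega)]
        · rw [if_neg (by omega), if_neg (by omega)]
    rw [hstep]
    exact ih (by omega) _ rfl

theorem next1_eq (buf : List Int) :
    ((PySem.List.pyRange ((buf.length : Int) - 1) (-1) (-1)).foldl
        (stepA (makeRisingEdge buf) buf)
        (List.replicate buf.length ((buf.length : Int)), ((buf.length : Int)))).1
      = (List.range buf.length).map (fun j => ((g0 buf j : Nat) : Int)) := by
  have hr : PySem.List.pyRange ((buf.length : Int) - 1) (-1) (-1)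
      = ((List.range buf.length).reverse.map (fun (j : Nat) => (j : Int))) := by
    rw [PySem.List.pyRange_neg_one_eq_reverse]
    norm_num
    exact PySem.List.pyRange_zero_nat buf.length
  rw [hr]
  have hrep : List.replicate buf.length ((buf.length : Int))
      = (List.range buf.length).map
          (fun j => if j < buf.length then (buf.length : Int) else ((g0 buf j : Nat) : Int)) := by
    apply List.ext_getElem (by simp)
    intro m h1 h2
    simp only [List.getElem_replicate, List.getElem_map, List.getElem_range]
    rw [if_pos (by simpa using h2)]
  rw [hrep]
  exact foldA buf buf.length (le_refl _) _ (by rw [g0_of_ge (le_refl _)])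

-- the fix-up loop over an all-n array keeps it unchanged
theorem inRange_of {n : Nat} {i : Int} (h1 : -(n : Int) ≤ i) (h2 : i < (n : Int)) :
    PySem.Raise.InRange n i := by
  unfold PySem.Raise.InRange
  omega

theorem fix_replicate (buf : List Int) (l : List Int)
    (hl : ∀ i ∈ l, 0 ≤ i ∧ PySem.Raise.InRange buf.length (i - 1)) :
    l.foldl stepFix (List.replicate buf.length ((buf.length : Int)))
      = List.replicate buf.length ((buf.length : Int)) := by
  induction l with
  | nil => rfl
  | cons a t ih =>
    rw [List.foldl_cons]
    obtain ⟨ha0, hain⟩ := hl a (by simp)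
    have hstep : stepFix (List.replicate buf.length ((buf.length : Int))) a
        = List.replicate buf.length ((buf.length : Int)) := by
      unfold stepFix
      have hget : PySem.List.pyGetD (List.replicate buf.length ((buf.length : Int))) (a - 1) 0
          = (buf.length : Int) := by
        have hm := PySem.List.pyGetD_mem (List.replicate buf.length ((buf.length : Int)))
          (i := a - 1) (0 : Int) (by simpa using hain)
        exact List.eq_of_mem_replicate hm
      rw [hget, PySem.List.pySetD_of_nonneg _ _ ha0]
      apply List.ext_getElem (by simp)
      intro m h1 h2
      simp only [List.getElem_set, List.getElem_replicate]
      split <;> rfl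
    rw [hstep]
    exact ih (fun i hi => hl i (by simp [hi]))

-- the fix-up loop from position f > 0 propagates the value at position f-1
theorem fix_window (n f : Nat) (L : Int) (base : Nat → Int) (hf0 : 0 < f)
    (hbase : base (f - 1) = L) :
    ∀ d m, f ≤ m → m + d = n →
      (PySem.List.pyRange ((m : Nat) : Int) ((n : Nat) : Int) 1).foldl stepFix
        ((List.range n).map (fun j => if f ≤ j ∧ j < m then L else base j))
      = (List.range n).map (fun j => if f ≤ j ∧ j < n then L else base j) := by
  intro d
  induction d with
  | zero =>
    intro m hm hmn
    have hmn' : m = n := by omega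
    subst hmn'
    rw [PySem.List.pyRange_one_eq_nil (le_refl _)]
    rfl
  | succ d ih =>
    intro m hm hmn
    have hmlt : m < n := by omega
    rw [PySem.List.pyRange_one_cons (by exact_mod_cast hmlt)]
    rw [List.foldl_cons]
    have hstep : stepFix
        ((List.range n).map (fun j => if f ≤ j ∧ j < m then L else base j)) ((m : Nat) : Int)
        = (List.range n).map (fun j => if f ≤ j ∧ j < m + 1 then L else base j) := by
      unfold stepFix
      have hm1 : ((m : Nat) : Int) - 1 = (((m - 1 : Nat) : Nat) : Int) := by omega
      rw [hm1, PySem.List.pyGetD_natCast]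
      have hget : ((List.range n).map (fun j => if f ≤ j ∧ j < m then L else base j)).getD
          (m - 1) 0 = L := by
        rw [PySem.List.getD_map_range _ _ _ _ (by omega)]
        by_cases hmf : m = f
        · subst hmf
          rw [if_neg (by omega), hbase]
        · rw [if_pos (by omega)]
      rw [hget, PySem.List.pySetD_natCast]
      apply List.ext_getElem (by simp)
      intro j h1 h2
      simp only [List.getElem_set, List.getElem_map, List.getElem_range,
        List.length_set, List.length_map, List.length_range] at h1 h2 ⊢
      by_cases hjm : m = j
      · subst hjm; rw [if_pos rfl, if_pos (by omega)]
      · rw [if_neg hjm]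
        by_cases hw : f ≤ j ∧ j < m
        · rw [if_pos hw, if_pos (by omega)]
        · rw [if_neg hw, if_neg (by omega)]
    rw [hstep]
    have hcast : ((m : Nat) : Int) + 1 = (((m + 1 : Nat) : Nat) : Int) := by push_cast; ring
    rw [hcast]
    exact ih (m + 1) (by omega) (by omega)

theorem filterMap_ite {α β : Type} (p : α → Bool) (f : α → β) :
    ∀ l : List α, l.filterMap (fun a => if p a then some (f a) else none)
      = (l.filter p).map f := by
  intro l
  induction l with
  | nil => rfl
  | cons a t ih =>
    by_cases h : p a <;> simp [h, ih]

theorem nz_eq (buf : List Int) :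
    (PySem.List.enumerate buf 0).filterMap (fun iv => if iv.2 ≠ 0 then some iv.1 else none)
      = nzL buf := by
  rw [PySem.List.enumerate_eq_map_pyRange buf 0, List.filterMap_map]
  have hlen : PySem.List.len buf = (buf.length : Int) := by
    simp [PySem.List.len_eq]
  rw [hlen, PySem.List.pyRange_zero_nat, List.filterMap_map]
  unfold nzL nzK
  rw [← filterMap_ite (fun j => buf.getD j 0 != 0) (fun (j : Nat) => (j : Int))]
  refine List.filterMap_congr ?_
  intro j _
  simp [Function.comp_def]

theorem nzK_sorted (buf : List Int) : (nzK buf).Pairwise (· < ·) := by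
  exact List.pairwise_lt_range.sublist List.filter_sublist

theorem mem_nzK {buf : List Int} {j : Nat} :
    j ∈ nzK buf ↔ j < buf.length ∧ buf.getD j 0 ≠ 0 := by
  simp [nzK]

theorem count_lt_iff (l : List Nat) (hl : l.Pairwise (· < ·)) :
    ∀ (q : Nat) (i : Nat) (hq : q < l.length),
      (l[q] < i ↔ q < l.countP (fun j => decide (j < i))) := by
  induction l with
  | nil => intro q i hq; simp at hq
  | cons a t ih =>
    rw [List.pairwise_cons] at hl
    intro q i hq
    rw [List.countP_cons]
    cases q with
    | zero =>
      simp only [List.getElem_cons_zero]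
      by_cases hai : a < i
      · rw [if_pos (by simpa using hai)]
        exact iff_of_true hai (by omega)
      · have h0 : t.countP (fun j => decide (j < i)) = 0 := by
          rw [List.countP_eq_zero]
          intro b hb
          have := hl.1 b hb
          simp only [decide_eq_true_eq]
          omega
        rw [h0, if_neg (by simpa using hai)]
        exact iff_of_false hai (by omega)
    | succ q =>
      simp only [List.getElem_cons_succ]
      have hqt : q < t.length := by simpa using hq
      rw [ih hl.2 q i hqt]
      by_cases hai : a < i
      · rw [if_pos (by simpa using hai)]
        omega
      · have h0 : t.countP (fun j => decide (j < i)) = 0 := by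
          rw [List.countP_eq_zero]
          intro b hb
          have := hl.1 b hb
          simp only [decide_eq_true_eq]
          omega
        rw [h0, if_neg (by simpa using hai)]
        omega

theorem cnt_le_length (buf : List Int) (i : Nat) : cnt buf i ≤ (nzL buf).length := by
  unfold cnt nzL
  rw [List.length_map]
  exact List.countP_le_length

theorem nzL_getElem (buf : List Int) (q : Nat) (hq : q < (nzL buf).length) :
    (nzL buf)[q] = (((nzK buf)[q]'(by simpa [nzL] using hq) : Nat) : Int) := by
  simp [nzL]

theorem bAdvance_eq (buf : List Int) (i : Nat) :
    ∀ (d p : Nat), (nzL buf).length - p ≤ d → p ≤ cnt buf i →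
      bAdvance (nzL buf) ((i : Nat) : Int) p = cnt buf i := by
  intro d
  induction d with
  | zero =>
    intro p hd hp
    rw [bAdvance, dif_neg (by omega)]
    have := cnt_le_length buf i
    omega
  | succ d ih =>
    intro p hd hp
    rw [bAdvance]
    by_cases h : p < (nzL buf).length
    · rw [dif_pos h]
      have hklen : p < (nzK buf).length := by simpa [nzL] using h
      have hiff : ((nzL buf)[p]'h < ((i : Nat) : Int)) ↔ p < cnt buf i := by
        rw [nzL_getElem buf p h, Int.ofNat_lt]
        exact count_lt_iff (nzK buf) (nzK_sorted buf) p i hklen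
      by_cases hlt : (nzL buf)[p]'h < ((i : Nat) : Int)
      · rw [if_pos hlt]
        exact ih (p + 1) (by omega) (by have := hiff.mp hlt; omega)
      · rw [if_neg hlt]
        have := hiff.mpr
        omega
    · rw [dif_neg h]
      have := cnt_le_length buf i
      omega

theorem cnt_mono (buf : List Int) (m : Nat) : cnt buf m ≤ cnt buf (m + 1) := by
  unfold cnt
  apply List.countP_mono_left
  intro a _ h
  simp only [decide_eq_true_eq] at h ⊢
  omega

theorem foldB (buf : List Int) :
    ∀ d m p, m + d = buf.length → p ≤ cnt buf m →
      ((List.range' m d).foldl (stepB (nzL buf)) (p, (List.range m).map (hB buf))).2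
        = (List.range buf.length).map (hB buf) := by
  intro d
  induction d with
  | zero =>
    intro m p hm _
    have hmn : m = buf.length := by omega
    subst hmn
    rfl
  | succ d ih =>
    intro m p hm hp
    rw [List.range'_succ, List.foldl_cons]
    have hstep : stepB (nzL buf) (p, (List.range m).map (hB buf)) m
        = (cnt buf m, (List.range (m + 1)).map (hB buf)) := by
      unfold stepB
      rw [bAdvance_eq buf m ((nzL buf).length - p) p (le_refl _) hp]
      simp only [Prod.mk.injEq, true_and]
      rw [List.range_succ, List.map_append]
      rfl
    rw [hstep]
    exact ih (m + 1) (cnt buf m) (by omega) (cnt_mono buf m)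

theorem sorted_split (l : List Nat) (hl : l.Pairwise (· < ·)) (k : Nat) :
    l = l.filter (fun j => decide (j < k)) ++ l.filter (fun j => !decide (j < k)) := by
  induction l with
  | nil => rfl
  | cons a t ih =>
    rw [List.pairwise_cons] at hl
    by_cases h : a < k
    · rw [List.filter_cons, List.filter_cons, if_pos (by simpa using h),
        if_neg (by simpa using h)]
      rw [List.cons_append]
      rw [← ih hl.2]
    · have h1 : t.filter (fun j => decide (j < k)) = [] := by
        rw [List.filter_eq_nil_iff]
        intro b hb
        have := hl.1 b hb
        simp only [decide_eq_true_eq]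
        omega
      have h2 : t.filter (fun j => !decide (j < k)) = t := by
        rw [List.filter_eq_self]
        intro b hb
        have := hl.1 b hb
        simp only [Bool.not_eq_true', decide_eq_false_iff_not]
        omega
      rw [List.filter_cons, List.filter_cons, if_neg (by simpa using h),
        if_pos (by simpa using h), h1, h2]
      rfl

theorem le_getLast_of_sorted :
    ∀ (l : List Nat), l.Pairwise (· < ·) → ∀ x ∈ l, ∀ (h : l ≠ []), x ≤ l.getLast h := by
  intro l
  induction l with
  | nil => simp
  | cons a t ih =>
    intro hl x hx h
    rw [List.pairwise_cons] at hl
    cases t with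
    | nil =>
      simp only [List.mem_singleton] at hx
      simp [hx, List.getLast]
    | cons b t2 =>
      rw [List.getLast_cons (by simp)]
      rcases List.mem_cons.mp hx with rfl | hx2
      · have := hl.1 ((b :: t2).getLast (by simp)) (List.getLast_mem (by simp))
        omega
      · exact ih hl.2 x hx2 (by simp)

theorem cnt_eq_len_filter (buf : List Int) (m : Nat) :
    cnt buf m = ((nzK buf).filter (fun j => decide (j < m))).length := by
  unfold cnt
  exact List.countP_eq_length_filter

theorem hB_of_ne {buf : List Int} {m : Nat} (h : g0 buf m ≠ buf.length) :
    cnt buf m < (nzL buf).length ∧ hB buf m = ((g0 buf m : Nat) : Int) := by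
  rcases g0_spec buf m with h0 | ⟨h1, h2, h3, h4⟩
  · exact absurd h0 h
  set g := g0 buf m with hg
  have hgmem : g ∈ nzK buf := mem_nzK.mpr ⟨h2, h3⟩
  have hsplit := sorted_split (nzK buf) (nzK_sorted buf) m
  set pre := (nzK buf).filter (fun j => decide (j < m)) with hpre
  set suf := (nzK buf).filter (fun j => !decide (j < m)) with hsuf
  have hgsuf : g ∈ suf := by
    rw [hsuf, List.mem_filter]
    refine ⟨hgmem, ?_⟩
    simp only [Bool.not_eq_true', decide_eq_false_iff_not]
    omega
  have hgle : ∀ x ∈ suf, g ≤ x := by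
    intro x hx
    rw [hsuf, List.mem_filter] at hx
    have hxm : m ≤ x := by
      have hx2 := hx.2
      simp only [Bool.not_eq_true', decide_eq_false_iff_not] at hx2
      omega
    have hxmem := mem_nzK.mp hx.1
    by_contra hcon
    exact hxmem.2 (h4 x hxm (by omega))
  obtain ⟨b, rest, hbr⟩ : ∃ b rest, suf = b :: rest := by
    cases hsufc : suf with
    | nil => rw [hsufc] at hgsuf; simp at hgsuf
    | cons b rest => exact ⟨b, rest, rfl⟩
  have hbg : b = g := by
    have hble : g ≤ b := hgle b (by rw [hbr]; simp)
    rcases List.mem_cons.mp (by rw [← hbr]; exact hgsuf) with hgb | hgrest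
    · omega
    · have hpair : suf.Pairwise (· < ·) := by
        rw [hsuf]
        exact (nzK_sorted buf).sublist List.filter_sublist
      rw [hbr, List.pairwise_cons] at hpair
      have := hpair.1 g hgrest
      omega
  have hclen : cnt buf m = pre.length := cnt_eq_len_filter buf m
  have hlen : (nzK buf).length = pre.length + suf.length := by
    conv_lhs => rw [hsplit]
    simp
  have hcl : cnt buf m < (nzK buf).length := by
    rw [hclen, hlen, hbr]
    simp
  have hget : (nzK buf)[cnt buf m]'hcl = g := by
    have heq : (nzK buf)[cnt buf m]'hcl
        = (pre ++ suf)[cnt buf m]'(by rw [← hsplit]; exact hcl) := by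
      congr 1
    rw [heq, List.getElem_append_right (by omega)]
    simp [hbr, hbg, hclen]
  have hcl' : cnt buf m < (nzL buf).length := by simpa [nzL] using hcl
  refine ⟨hcl', ?_⟩
  unfold hB
  rw [dif_pos hcl', nzL_getElem buf _ hcl', hget]

theorem cnt_full {buf : List Int} {m : Nat} (h : g0 buf m = buf.length) :
    cnt buf m = (nzL buf).length := by
  unfold cnt nzL
  rw [List.length_map, List.countP_eq_length]
  intro a ha
  rcases mem_nzK.mp ha with ⟨haln, hanz⟩
  rw [g0_eq_iff] at h
  simp only [decide_eq_true_eq]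
  by_contra hcon
  exact hanz (h a (by omega) haln)

theorem getLast_nzK {buf : List Int} {f : Nat} (hf : 0 < f) (hn : g0 buf f = buf.length)
    (hne : g0 buf (f - 1) ≠ buf.length) :
    (nzL buf).getLastD 0 = (((f - 1 : Nat) : Nat) : Int) ∧ g0 buf (f - 1) = f - 1 := by
  have hflt : f - 1 < buf.length := by
    by_contra hcon
    exact hne (g0_of_ge (by omega))
  have hrec := g0_of_lt (buf := buf) hflt
  have hf1 : f - 1 + 1 = f := by omega
  rw [hf1] at hrec
  have hPf : buf.getD (f - 1) 0 ≠ 0 := by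
    by_contra hcon
    rw [hrec, if_neg (by simpa using hcon)] at hne
    exact hne hn
  have hgf : g0 buf (f - 1) = f - 1 := by rw [hrec, if_pos hPf]
  have hmem : (f - 1) ∈ nzK buf := mem_nzK.mpr ⟨hflt, hPf⟩
  have hnz : nzK buf ≠ [] := by
    intro hcon
    rw [hcon] at hmem
    simp at hmem
  have hall : ∀ x ∈ nzK buf, x < f := by
    intro x hx
    rcases mem_nzK.mp hx with ⟨hxl, hxn⟩
    rw [g0_eq_iff] at hn
    by_contra hcon
    exact hxn (hn x (by omega) hxl)
  have hlastmem := List.getLast_mem hnz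
  have hlast_le : (nzK buf).getLast hnz ≤ f - 1 := by
    have := hall _ hlastmem
    omega
  have hlast_ge : f - 1 ≤ (nzK buf).getLast hnz :=
    le_getLast_of_sorted (nzK buf) (nzK_sorted buf) (f - 1) hmem hnz
  have hlast : (nzK buf).getLast hnz = f - 1 := by omega
  constructor
  · unfold nzL
    rw [List.getLastD_eq_getLast?, List.getLast?_map]
    rw [List.getLast?_eq_some_getLast (h := hnz), hlast]
    rfl
  · exact hgf

-- ===== VERDICT (by name: the statement is the Claim_ definition above) =====
theorem makeNext1_spec : Claim_equal_makeNext1 := by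
  intro buf _
  simp only [Spec_makeNext1, makeNext1, makeNext1_alt]
  rw [next1_eq buf, nz_eq buf]
  by_cases hnil : nzK buf = []
  · have hnilL : nzL buf = [] := by simp [nzL, hnil]
    rw [if_pos hnilL]
    have hzero : ∀ j, j < buf.length → buf.getD j 0 = 0 := by
      intro j hj
      by_contra hcon
      have hmem : j ∈ nzK buf := mem_nzK.mpr ⟨hj, hcon⟩
      rw [hnil] at hmem
      simp at hmem
    have hg : ∀ k : Nat, g0 buf k = buf.length := fun k =>
      (g0_eq_iff buf k).mpr (fun j _ hjl => hzero j hjl)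
    have hmap : (List.range buf.length).map (fun j => ((g0 buf j : Nat) : Int))
        = List.replicate buf.length ((buf.length : Int)) := by
      apply List.ext_getElem (by simp)
      intro m h1 h2
      simp only [List.getElem_map, List.getElem_replicate, hg]
    rw [hmap]
    by_cases hn0 : buf.length = 0
    · simp [hn0]
    · rw [if_pos (List.mem_replicate.mpr ⟨hn0, rfl⟩)]
      have hidx : PySem.List.index? (List.replicate buf.length ((buf.length : Int)))
          ((buf.length : Int)) = some 0 := by
        cases hlen : buf.length with
        | zero => exact absurd hlen hn0
        | succ m => rw [List.replicate_succ]; exact PySem.List.index?_cons_self _ _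
      rw [hidx]
      simp only [Option.getD_some, Nat.cast_zero]
      apply fix_replicate
      intro i hi
      rw [PySem.List.mem_pyRange_one] at hi
      exact ⟨hi.1, inRange_of (by omega) (by omega)⟩
  · have hnilL : nzL buf ≠ [] := by
      simpa [nzL] using hnil
    rw [if_neg hnilL]
    have hBmap : ((List.range buf.length).foldl (stepB (nzL buf)) (0, ([] : List Int))).2
        = (List.range buf.length).map (hB buf) := by
      have h0 := foldB buf buf.length 0 0 (by omega) (Nat.zero_le _)
      simpa [List.range_eq_range'] using h0
    rw [hBmap]
    by_cases hmem : ((buf.length : Int))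
        ∈ (List.range buf.length).map (fun j => ((g0 buf j : Nat) : Int))
    · rw [if_pos hmem]
      have hsome := (PySem.List.index?_isSome_iff _ _).mpr hmem
      obtain ⟨f0, hf0⟩ := Option.isSome_iff_exists.mp hsome
      obtain ⟨hflt, hfval, hfmin⟩ := PySem.List.getElem_of_index?_eq_some hf0
      have hflen : f0 < buf.length := by simpa using hflt
      have hg0f : g0 buf f0 = buf.length := by
        simp only [List.getElem_map, List.getElem_range] at hfval
        exact_mod_cast hfval
      have hmin : ∀ j, j < f0 → g0 buf j ≠ buf.length := by
        intro j hj hcon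
        have hne := hfmin j hj
        simp only [List.getElem_map, List.getElem_range] at hne
        exact hne (by exact_mod_cast hcon)
      have hf0pos : 0 < f0 := by
        by_contra hcon
        have hf00 : f0 = 0 := by omega
        subst hf00
        rw [g0_eq_iff] at hg0f
        apply hnil
        unfold nzK
        rw [List.filter_eq_nil_iff]
        intro a ha
        rw [List.mem_range] at ha
        simp only [bne_iff_ne, ne_eq, not_not]
        exact hg0f a (by omega) ha
      have hnef : g0 buf (f0 - 1) ≠ buf.length := hmin (f0 - 1) (by omega)
      obtain ⟨hlastD, hgf1⟩ := getLast_nzK hf0pos hg0f hnef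
      rw [hf0]
      simp only [Option.getD_some]
      have hinit : (List.range buf.length).map (fun j => ((g0 buf j : Nat) : Int))
          = (List.range buf.length).map
              (fun j => if f0 ≤ j ∧ j < f0 then (((f0 - 1 : Nat) : Nat) : Int)
                else ((g0 buf j : Nat) : Int)) :=
        List.map_congr_left (fun a _ => by rw [if_neg (by omega)])
      rw [hinit]
      rw [fix_window buf.length f0 (((f0 - 1 : Nat) : Nat) : Int)
            (fun j => ((g0 buf j : Nat) : Int)) hf0pos (by simp [hgf1]) (buf.length - f0) f0
            (le_refl _) (by omega)]
      apply List.map_congr_left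
      intro a ha
      rw [List.mem_range] at ha
      by_cases haf : f0 ≤ a
      · rw [if_pos ⟨haf, ha⟩]
        unfold hB
        rw [dif_neg (by rw [cnt_full (g0_mono_eq hg0f haf)]; omega)]
        exact hlastD.symm
      · rw [if_neg (by omega)]
        exact ((hB_of_ne (hmin a (by omega))).2).symm
    · rw [if_neg hmem]
      apply List.map_congr_left
      intro a ha
      have hne : g0 buf a ≠ buf.length := by
        intro hcon
        apply hmem
        rw [List.mem_map]
        exact ⟨a, ha, by rw [hcon]⟩
      exact ((hB_of_ne hne).2).symm
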